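-- pv_equiv track=rewrite | github.com/cis-1902-202/hw2-solutions | src/calculator.py | validate_equation
-- ===== SOURCE A (Python) =====
-- def validate_equation(equation: str) -> bool:
--     values = equation.split()
--
--     # nonempty equation
--     if len(values) == 0:
--         return False
--
--     # numbers and operators alternate
--     for i in range(len(values)):
--         if i % 2 == 0:
--             if not values[i].isdigit():
--                 return False
--         else:
--             if values[i] != "+" and values[i] != "-":
--                 return False
--
--     # last value is a number
--     return len(values) % 2 == 1
-- ===== SOURCE B (Python) =====
-- def validate_equation(equation: str) -> bool:
--     # grammar check: a valid equation is  number (operator number)*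
--     def ok(vs):
--         if len(vs) == 1:
--             return vs[0].isdigit()
--         if len(vs) >= 3:
--             return vs[0].isdigit() and vs[1] in ("+", "-") and ok(vs[2:])
--         return False  # empty or even length
--     return ok(equation.split())
-- ===== Notes on version B (the rewrite author's own statement) =====
-- stated objective: alternative
-- what changed: Replaces A's index-parity loop plus separate emptiness and final-parity checks by a single recursive grammar check consuming 'number (operator number)*' two tokens at a time.
import Mathlib
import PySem

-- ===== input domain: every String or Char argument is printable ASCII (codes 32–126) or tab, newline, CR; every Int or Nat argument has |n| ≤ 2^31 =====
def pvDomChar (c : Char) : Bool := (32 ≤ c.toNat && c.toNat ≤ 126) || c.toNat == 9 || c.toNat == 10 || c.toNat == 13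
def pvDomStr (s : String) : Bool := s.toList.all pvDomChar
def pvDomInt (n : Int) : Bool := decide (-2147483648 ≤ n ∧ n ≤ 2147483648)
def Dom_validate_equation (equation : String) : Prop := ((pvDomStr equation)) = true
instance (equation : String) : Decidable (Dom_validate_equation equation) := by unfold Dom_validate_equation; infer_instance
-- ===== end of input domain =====

-- B replaces A's index-parity loop by a recursive 'number (operator number)*' grammar check (alternative decomposition, same cost).

-- ===== PORT A =====
-- the for-loop over range(len(values)): i is the running index, early return False = result false
def pvLoopA : List String → Nat → Bool
  | [], _ => true
  | v :: rest, i =>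
    if i % 2 == 0 then
      if !(PySem.Str.strIsdigit v) then false else pvLoopA rest (i + 1)
    else
      if v ≠ "+" && v ≠ "-" then false else pvLoopA rest (i + 1)

def validate_equation (equation : String) : Bool :=
  let values := PySem.Str.split₀ equation
  if values.length == 0 then false
  else if pvLoopA values 0 then values.length % 2 == 1 else false

-- ===== PORT B =====
-- B's helper ok(vs): len 1 → digit; len ≥ 3 → digit, operator, recurse on vs[2:]; else False
def pvOkB : List String → Bool
  | [] => false
  | [v] => PySem.Str.strIsdigit v
  | [_, _] => false
  | v :: op :: rest =>
    PySem.Str.strIsdigit v && (op == "+" || op == "-") && pvOkB rest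

def validate_equation_alt (equation : String) : Bool :=
  pvOkB (PySem.Str.split₀ equation)

-- ===== PRECONDITION & SPEC =====
def Spec_validate_equation (equation : String) (out : Bool) : Prop := out = validate_equation_alt equation
instance (equation : String) (out : Bool) : Decidable (Spec_validate_equation equation out) := by unfold Spec_validate_equation; infer_instance

-- ===== CLAIM (what is proved, stated in full; the proofs are below) =====
def Claim_equal_validate_equation : Prop := ∀ (equation : String), Dom_validate_equation equation → Spec_validate_equation equation (validate_equation equation)

-- ===== LEMMAS AND PROOFS =====

lemma pvLoopA_mod2 (vs : List String) (i : Nat) : pvLoopA vs (i + 2) = pvLoopA vs i := by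
  induction vs generalizing i with
  | nil => rfl
  | cons v rest ih =>
    simp only [pvLoopA, Nat.add_mod_right]
    rw [ih (i + 1)]

lemma loopA_cons_cons (v op : String) (rest : List String) :
    pvLoopA (v :: op :: rest) 0
      = (PySem.Str.strIsdigit v && ((op == "+" || op == "-") && pvLoopA rest 0)) := by
  have h2 : pvLoopA rest 2 = pvLoopA rest 0 := pvLoopA_mod2 rest 0
  have e0 : pvLoopA (v :: op :: rest) 0
      = if !(PySem.Str.strIsdigit v) then false else pvLoopA (op :: rest) 1 := rfl
  have e1 : pvLoopA (op :: rest) 1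
      = if (op ≠ "+" && op ≠ "-") then false else pvLoopA rest 2 := rfl
  rw [e0, e1, h2]
  cases hd : PySem.Str.strIsdigit v
  · rfl
  · by_cases hp : op = "+"
    · rw [hp]; rfl
    · by_cases hm : op = "-"
      · rw [hm]; rfl
      · have c1 : (op ≠ "+" && op ≠ "-") = true := by simp [hp, hm]
        have c2 : (op == "+" || op == "-") = false := by simp [hp, hm]
        rw [c1, c2]; rfl

lemma pvMain (vs : List String) :
    (if vs.length == 0 then false
     else if pvLoopA vs 0 then (vs.length % 2 == 1 : Bool) else false) = pvOkB vs := by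
  induction vs using pvOkB.induct with
  | case1 => rfl
  | case2 v =>
    cases hd : PySem.Str.strIsdigit v <;> simp [pvOkB, pvLoopA, hd]
  | case3 v op =>
    cases h : pvLoopA [v, op] 0 <;> simp [pvOkB, h]
  | case4 v op r1 hne ih =>
    obtain ⟨w, ws, rfl⟩ : ∃ w ws, r1 = w :: ws := by
      cases r1 with
      | nil => exact absurd rfl hne
      | cons w ws => exact ⟨w, ws, rfl⟩
    have ih' : (if pvLoopA (w :: ws) 0 then ((w :: ws).length % 2 == 1 : Bool) else false)
        = pvOkB (w :: ws) := by simpa using ih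
    rw [loopA_cons_cons]
    cases hd : PySem.Str.strIsdigit v
    · have hd2 : PySem.Chars.strIsdigit v.toList = false := by simpa using hd
      simp [pvOkB, hd2]
    · have hd2 : PySem.Chars.strIsdigit v.toList = true := by simpa using hd
      cases hop : (op == "+" || op == "-")
      · simp [pvOkB, hd2, hop]
      · have e1 : pvOkB (v :: op :: w :: ws) = pvOkB (w :: ws) := by
          simp [pvOkB, hd2, hop]
        have hmm : ((v :: op :: w :: ws).length % 2 == 1 : Bool)
            = ((w :: ws).length % 2 == 1 : Bool) := by
          simp only [List.length_cons]
          have : (ws.length + 1 + 1 + 1) % 2 = (ws.length + 1) % 2 := by omega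
          rw [this]
        rw [e1, ← ih', hmm]
        simp

-- ===== VERDICT (by name: the statement is the Claim_ definition above) =====
theorem validate_equation_spec : Claim_equal_validate_equation := by
  intro equation _
  unfold Spec_validate_equation validate_equation validate_equation_alt
  exact pvMain _
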